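-- pv_equiv track=rewrite | github.com/sheltermanager/asm3 | src/dbms/base.py | split_queries
-- ===== SOURCE A (Python) =====
-- def split_queries(sql):
--     """
--     Splits semi-colon separated queries in a single
--     string into a list and returns them for execution.
--     """
--     queries = []
--     x = 0
--     instr = False
--     while x <= len(sql):
--         q = sql[x:x+1]
--         if q == "'":
--             instr = not instr
--         if x == len(sql):
--             queries.append(sql[0:x].strip())
--             break
--         if q == ";" and not instr:
--             queries.append(sql[0:x].strip())
--             sql = sql[x+1:]
--             x = 0
--             continue
--         x += 1
--     return queries
-- ===== SOURCE B (Python) =====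
-- def split_queries(sql):
--     """
--     Splits semi-colon separated queries in a single
--     string into a list and returns them for execution.
--     """
--     queries = []
--     buf = []
--     instr = False
--     for ch in sql:
--         if ch == "'":
--             instr = not instr
--         if ch == ";" and not instr:
--             queries.append("".join(buf).strip())
--             buf = []
--         else:
--             buf.append(ch)
--     queries.append("".join(buf).strip())
--     return queries
-- ===== Notes on version B (the rewrite author's own statement) =====
-- stated objective: faster
-- what changed: replaces the restart-the-scan-after-each-semicolon loop with repeated O(n) slicing (sql[0:x], sql[x+1:]) by a single left-to-right pass over the characters that accumulates the current segment in a buffer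
import Mathlib
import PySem

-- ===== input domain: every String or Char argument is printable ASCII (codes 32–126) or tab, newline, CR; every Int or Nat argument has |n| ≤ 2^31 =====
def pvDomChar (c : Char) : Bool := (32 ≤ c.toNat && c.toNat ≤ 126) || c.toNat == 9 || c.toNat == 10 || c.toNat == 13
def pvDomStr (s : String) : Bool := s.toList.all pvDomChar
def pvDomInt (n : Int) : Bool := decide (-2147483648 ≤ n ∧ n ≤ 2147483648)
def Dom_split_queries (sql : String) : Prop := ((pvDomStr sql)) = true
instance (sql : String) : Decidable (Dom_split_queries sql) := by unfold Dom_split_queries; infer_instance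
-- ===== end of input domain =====

-- B is a single linear pass over the characters (asymptotically faster); A restarts the
-- scan and re-slices the remaining string after every semicolon.

-- ===== PORT A =====
-- A's while loop, step for step: state is the (current) string s, index x, instr flag and
-- the accumulated list; the 'x ≤ len' while-guard together with the 'x == len' break is
-- rendered as the totality guard 's.length ≤ x' (the loop only ever reaches x = len).
def splitLoopA (s : List Char) (x : Nat) (instr : Bool) (acc : List String) : List String :=
  let q := PySem.List.slice s (some (x : Int)) (some ((x : Int) + 1))   -- sql[x:x+1]
  let instr' := if q = ['\''] then !instr else instr
  if _h : s.length ≤ x then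
    acc ++ [String.ofList (PySem.Chars.strip s)]                           -- sql[0:x].strip() with x = len
  else if q = [';'] ∧ instr' = false then
    splitLoopA (PySem.List.slice s (some ((x : Int) + 1)) none) 0 instr'
      (acc ++ [String.ofList (PySem.Chars.strip (PySem.List.slice s none (some (x : Int))))])
  else
    splitLoopA s (x + 1) instr' acc
termination_by s.length - x
decreasing_by
  · have : (x:Int) + 1 = ((x+1 : Nat) : Int) := by push_cast; ring
    rw [this, PySem.List.slice_from_natCast]; simp; omega
  · omega

def split_queries (sql : String) : List String :=
  splitLoopA sql.toList 0 false []

-- ===== PORT B =====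
-- Source B's single pass: the remaining characters, the buffer of the current segment,
-- the in-string flag and the accumulated list.
def splitLoopB (rest : List Char) (buf : List Char) (instr : Bool) (acc : List String) : List String :=
  match rest with
  | [] => acc ++ [String.ofList (PySem.Chars.strip buf)]
  | c :: r =>
    let instr' := if c = '\'' then !instr else instr
    if c = ';' ∧ instr' = false then
      splitLoopB r [] instr' (acc ++ [String.ofList (PySem.Chars.strip buf)])
    else
      splitLoopB r (buf ++ [c]) instr' acc

def split_queries_alt (sql : String) : List String :=
  splitLoopB sql.toList [] false []

-- ===== PRECONDITION & SPEC =====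
def Spec_split_queries (sql : String) (out : List String) : Prop := out = split_queries_alt sql
instance (sql : String) (out : List String) : Decidable (Spec_split_queries sql out) := by unfold Spec_split_queries; infer_instance

-- ===== CLAIM (what is proved, stated in full; the proofs are below) =====
def Claim_equal_split_queries : Prop := ∀ (sql : String), Dom_split_queries sql → Spec_split_queries sql (split_queries sql)

-- ===== LEMMAS AND PROOFS =====

-- Invariant: when A's scan stands at index x of s, B has consumed exactly take x s into its
-- buffer (with the same instr flag) and is about to process drop x s.
lemma splitLoop_eq (n : Nat) :
    ∀ (s : List Char) (x : Nat) (instr : Bool) (acc : List String),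
      s.length - x = n → x ≤ s.length →
      splitLoopA s x instr acc = splitLoopB (s.drop x) (s.take x) instr acc := by
  induction n with
  | zero =>
    intro s x instr acc hn hx
    have hx' : x = s.length := by omega
    subst hx'
    rw [splitLoopA]
    simp [splitLoopB]
  | succ n ih =>
    intro s x instr acc hn hx
    have hlt : x < s.length := by omega
    have hq : PySem.List.slice s (some (x : Int)) (some ((x : Int) + 1)) = [s[x]] := by
      have : (x:Int) + 1 = ((x:Int) + ((1:Nat):Int)) := by push_cast; ring
      rw [this, PySem.List.slice_natCast_add]
      rw [List.take_one, List.head?_drop]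
      simp [hlt]
    have hdrop : s.drop x = s[x] :: s.drop (x + 1) := List.drop_eq_getElem_cons hlt
    have hne : ¬ s.length ≤ x := by omega
    have e1 : ([s[x]] = ['\'']) = (s[x] = '\'') := by simp
    have e2 : ([s[x]] = [';']) = (s[x] = ';') := by simp
    rw [splitLoopA, hdrop]
    simp only [hq, e1, e2, dif_neg hne, splitLoopB]
    by_cases hsc : s[x] = ';' ∧ (if s[x] = '\'' then !instr else instr) = false
    · simp only [if_pos hsc]
      have hfrom : PySem.List.slice s (some ((x : Int) + 1)) none = s.drop (x+1) := by
        have : (x:Int) + 1 = ((x+1 : Nat) : Int) := by push_cast; ring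
        rw [this, PySem.List.slice_from_natCast]
      rw [hfrom, PySem.List.slice_to_natCast s x]
      have := ih (s.drop (x+1)) 0 (if s[x] = '\'' then !instr else instr)
        (acc ++ [String.ofList (PySem.Chars.strip (s.take x))]) (by simp; omega) (by omega)
      simpa using this
    · simp only [if_neg hsc]
      have := ih s (x+1) (if s[x] = '\'' then !instr else instr) acc (by omega) (by omega)
      rw [this, List.take_add_one, List.getElem?_eq_getElem hlt]
      simp

-- ===== VERDICT (by name: the statement is the Claim_ definition above) =====
theorem split_queries_spec : Claim_equal_split_queries := by
  intro sql _
  unfold Spec_split_queries split_queries split_queries_alt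
  have := splitLoop_eq (sql.toList.length) sql.toList 0 false [] (by omega) (by omega)
  simpa using this
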